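-- pv_equiv track=rewrite | github.com/noboru007/shogi-vs-ai | functions/main_flask.py | format_legal_moves_grouped
-- ===== SOURCE A (Python) =====
-- def format_legal_moves_grouped(legal_moves_usi):
--     """Group legal moves by source square (or as drops) for readable prompt display.
--
--     出力例:
--         8b発: 8b9b, 8b7b, 8b6b, 8b5b, 8b4b, 8b3b
--         7c発: 7c7d
--         打: P*5e, P*5f
--     """
--     from_piece = {}
--     drops = []
--     for m in legal_moves_usi:
--         if "*" in m:
--             drops.append(m)
--         else:
--             src = m[:2]
--             from_piece.setdefault(src, []).append(m)
--     lines = []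
--     for src in sorted(from_piece.keys()):
--         lines.append(f"        {src}発: {', '.join(from_piece[src])}")
--     if drops:
--         lines.append(f"        打: {', '.join(drops)}")
--     return "\n".join(lines)
-- ===== SOURCE B (Python) =====
-- def format_legal_moves_grouped(legal_moves_usi):
--     """Group legal moves by source square (or as drops) for readable prompt display."""
--     moves = [m for m in legal_moves_usi if "*" not in m]
--     drops = [m for m in legal_moves_usi if "*" in m]
--     lines = [
--         "        {}発: {}".format(src, ", ".join(m for m in moves if m[:2] == src))
--         for src in sorted({m[:2] for m in moves})
--     ]
--     if drops:
--         lines.append("        打: {}".format(", ".join(drops)))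
--     return "\n".join(lines)
-- ===== Notes on version B (the rewrite author's own statement) =====
-- stated objective: alternative
-- what changed: Replaces the dict-of-lists grouping pass by a two-filter decomposition: split moves/drops with comprehensions, sort the distinct source squares of a set comprehension, and rebuild each group by filtering the move list per source, so no mutable dict is maintained.
import Mathlib
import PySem

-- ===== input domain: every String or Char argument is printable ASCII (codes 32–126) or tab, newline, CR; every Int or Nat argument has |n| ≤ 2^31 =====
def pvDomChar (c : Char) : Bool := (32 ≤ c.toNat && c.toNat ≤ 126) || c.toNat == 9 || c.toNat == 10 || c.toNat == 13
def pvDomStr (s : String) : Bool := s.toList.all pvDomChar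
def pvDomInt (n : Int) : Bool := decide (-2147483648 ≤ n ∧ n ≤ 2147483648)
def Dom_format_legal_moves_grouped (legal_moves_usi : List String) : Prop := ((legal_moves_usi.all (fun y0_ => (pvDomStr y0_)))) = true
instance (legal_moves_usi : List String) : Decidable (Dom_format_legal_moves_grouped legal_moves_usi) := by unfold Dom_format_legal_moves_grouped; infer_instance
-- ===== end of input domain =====

-- B replaces A's mutable dict-of-lists grouping by a two-filter decomposition (split moves/drops,
-- sort the distinct sources, rebuild each group by filtering per source); objective: alternative.

-- ===== PORT A =====
-- one loop building (from_piece, drops); then lines from the sorted keys; then the join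
def format_legal_moves_grouped (legal_moves_usi : List String) : String :=
  let st := legal_moves_usi.foldl
    (fun (st : PySem.Dict String (List String) × List String) m =>
      if PySem.Str.isIn "*" m then (st.1, st.2 ++ [m])
      else (st.1.modify (PySem.Str.slice m none (some 2)) [] (fun l => l ++ [m]), st.2))
    (PySem.Dict.empty, [])
  let from_piece := st.1
  let drops := st.2
  let lines := (PySem.List.sorted from_piece.keys (fun x => x) false).foldl
    (fun acc src => acc ++ ["        " ++ src ++ "発: " ++ PySem.Str.join ", " (from_piece.getD src [])]) []
  let lines := if drops = [] then lines
    else lines ++ ["        打: " ++ PySem.Str.join ", " drops]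
  PySem.Str.join "\n" lines

-- ===== PORT B =====
def format_legal_moves_grouped_alt (legal_moves_usi : List String) : String :=
  let moves := legal_moves_usi.filter (fun m => !PySem.Str.isIn "*" m)
  let drops := legal_moves_usi.filter (fun m => PySem.Str.isIn "*" m)
  let lines := (PySem.List.sorted
      (PySem.Set.ofList (moves.map (fun m => PySem.Str.slice m none (some 2)))) (fun x => x) false).map
    (fun src => "        " ++ src ++ "発: " ++
      PySem.Str.join ", " (moves.filter (fun m => PySem.Str.slice m none (some 2) == src)))
  let lines := if drops = [] then lines
    else lines ++ ["        打: " ++ PySem.Str.join ", " drops]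
  PySem.Str.join "\n" lines

-- ===== PRECONDITION & SPEC =====
def Spec_format_legal_moves_grouped (legal_moves_usi : List String) (out : String) : Prop := out = format_legal_moves_grouped_alt legal_moves_usi
instance (legal_moves_usi : List String) (out : String) : Decidable (Spec_format_legal_moves_grouped legal_moves_usi out) := by unfold Spec_format_legal_moves_grouped; infer_instance

-- ===== CLAIM (what is proved, stated in full; the proofs are below) =====
def Claim_equal_format_legal_moves_grouped : Prop := ∀ (legal_moves_usi : List String), Dom_format_legal_moves_grouped legal_moves_usi → Spec_format_legal_moves_grouped legal_moves_usi (format_legal_moves_grouped legal_moves_usi)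

-- ===== LEMMAS AND PROOFS =====

-- A's single pass splits into the dict fold over the non-drops and the drop filter.
theorem pv_fold_split (xs : List String) (d : PySem.Dict String (List String)) (acc : List String) :
    xs.foldl
      (fun (st : PySem.Dict String (List String) × List String) m =>
        if PySem.Str.isIn "*" m then (st.1, st.2 ++ [m])
        else (st.1.modify (PySem.Str.slice m none (some 2)) [] (fun l => l ++ [m]), st.2))
      (d, acc)
    = ((xs.filter (fun m => !PySem.Str.isIn "*" m)).foldl
        (fun d m => d.modify (PySem.Str.slice m none (some 2)) [] (fun l => l ++ [m])) d,
       acc ++ xs.filter (fun m => PySem.Str.isIn "*" m)) := by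
  induction xs generalizing d acc with
  | nil => simp
  | cons x xs ih =>
    cases h : PySem.Str.isIn "*" x
    · simp only [List.foldl_cons, List.filter_cons, h, Bool.not_false, Bool.false_eq_true,
        if_false, if_true,]
      rw [ih]
    · simp only [List.foldl_cons, List.filter_cons, h, Bool.not_true, Bool.false_eq_true,
        if_false, if_true,]
      rw [ih]
      simp

-- the grouping dict, read back at any key, is the per-source filter of the processed non-drops
theorem pv_getD_fold (l : List String) (d : PySem.Dict String (List String)) (k : String) :
    (l.foldl (fun d m => d.modify (PySem.Str.slice m none (some 2)) [] (fun t => t ++ [m])) d).getD k []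
    = d.getD k [] ++ l.filter (fun m => PySem.Str.slice m none (some 2) == k) := by
  induction l generalizing d with
  | nil => simp
  | cons x l ih =>
    simp only [List.foldl_cons, List.filter_cons, ih, PySem.Dict.getD_modify]
    by_cases h : k = PySem.Str.slice x none (some 2)
    · simp [h]
    · have h2 : ¬ (PySem.Str.slice x none (some 2) = k) := fun e => h e.symm
      simp [h, h2]

-- ===== VERDICT (by name: the statement is the Claim_ definition above) =====
theorem format_legal_moves_grouped_spec : Claim_equal_format_legal_moves_grouped := by
  intro xs _
  unfold Spec_format_legal_moves_grouped format_legal_moves_grouped format_legal_moves_grouped_alt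
  rw [pv_fold_split]
  set moves := xs.filter (fun m => !PySem.Str.isIn "*" m) with hmoves
  have hkeys :
      ((moves.foldl (fun d m => d.modify (PySem.Str.slice m none (some 2)) [] (fun l => l ++ [m]))
          PySem.Dict.empty).keys)
        = PySem.Set.ofList (moves.map (fun m => PySem.Str.slice m none (some 2))) := by
    rw [PySem.Dict.keys_foldl_modify_key]
    simp [PySem.Dict.keys_empty, PySem.Set.update, PySem.Set.ofList_eq_foldl]
  simp only [PySem.List.foldl_append_singleton_eq_map, hkeys, pv_getD_fold,
    PySem.Dict.getD_empty, List.nil_append]
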